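-- pv_equiv track=rewrite | github.com/swharden/Palila | palila.py | _getTagUrl
-- ===== SOURCE A (Python) =====
-- def _getTagUrl(s: str):
--     """
--     Convert a string into a url-safe anchor tag
--     """
--
--     # must be lowercase
--     tag = s.lower()
--
--     # non-alphanumeric letters are replaced by dashes
--     letters = list(tag)
--     for i, letter in enumerate(letters):
--         if letter.isalpha() or letter.isnumeric():
--             continue
--         letters[i] = "-"
--     tag = "".join(letters)
--
--     # disallow multiple dashes
--     while "--" in tag:
--         tag = tag.replace("--", "-")
--
--     # disallow starting or ending with a dash
--     tag = tag.strip("-")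
--
--     return tag
-- ===== SOURCE B (Python) =====
-- def _getTagUrl(s: str):
--     """
--     Convert a string into a url-safe anchor tag
--     """
--     words = []
--     current = ""
--     for ch in s.lower():
--         if ch.isalpha() or ch.isnumeric():
--             current += ch
--         else:
--             if current:
--                 words.append(current)
--             current = ""
--     if current:
--         words.append(current)
--     return "-".join(words)
-- ===== Notes on version B (the rewrite author's own statement) =====
-- stated objective: simpler
-- what changed: A lowercases, maps each non-alphanumeric character to a dash, repeatedly runs a replace pass collapsing double dashes until none remain, then strips edge dashes; B does one scan of the lowered string collecting maximal alphanumeric runs and joins them with single dashes, with no replace loop and no strip.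
import Mathlib
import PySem

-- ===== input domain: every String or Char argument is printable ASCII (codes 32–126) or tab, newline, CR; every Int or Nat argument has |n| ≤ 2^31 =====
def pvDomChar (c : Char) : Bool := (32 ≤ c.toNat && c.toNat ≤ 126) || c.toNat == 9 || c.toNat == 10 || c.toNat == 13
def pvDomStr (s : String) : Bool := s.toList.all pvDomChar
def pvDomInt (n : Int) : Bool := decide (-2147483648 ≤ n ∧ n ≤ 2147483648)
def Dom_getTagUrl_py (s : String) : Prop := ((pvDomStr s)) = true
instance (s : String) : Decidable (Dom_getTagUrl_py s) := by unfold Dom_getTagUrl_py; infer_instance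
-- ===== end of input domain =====

-- B replaces A's mark-dashes / while-replace("--","-") / strip("-") pipeline by a single
-- scan that collects maximal alphanumeric runs and joins them with "-" (objective: simpler).

-- ===== PORT A =====
-- the 'while "--" in tag: tag = tag.replace("--", "-")' loop; fuel = len(tag) suffices,
-- since each replace strictly shortens a string containing "--" (dashLoop_eq_squeeze below)
def dashLoop : Nat → List Char → List Char
  | 0, tag => tag
  | fuel + 1, tag =>
      if PySem.Chars.isIn ['-', '-'] tag then
        dashLoop fuel (PySem.Chars.replace tag ['-', '-'] ['-'])
      else tag

-- letter.isnumeric(): ported as PySem.Chars.isdigit, exact on the ASCII domain Dom_getTagUrl_py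
-- (for ASCII characters, str.isnumeric and str.isdigit coincide)
def getTagUrl_py (s : String) : String :=
  let tag := PySem.Str.lower s
  -- letters = list(tag); letters[i] = "-" for non-alphanumeric i; tag = "".join(letters)
  let letters := tag.toList.map (fun c => if PySem.Chars.isalpha c || PySem.Chars.isdigit c then c else '-')
  let tag2 := dashLoop letters.length letters
  String.ofList (PySem.Chars.stripChars tag2 ['-'])

-- ===== PORT B =====
-- for ch in lowered: grow 'current' on alphanumeric ch, else flush it into 'words'; final flush
def bGo : List Char → List Char → List (List Char) → List (List Char)
  | [], cur, ws => if cur = [] then ws else ws ++ [cur]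
  | c :: t, cur, ws =>
      if PySem.Chars.isalpha c || PySem.Chars.isdigit c then bGo t (cur ++ [c]) ws
      else bGo t [] (if cur = [] then ws else ws ++ [cur])

def getTagUrl_py_alt (s : String) : String :=
  String.ofList (PySem.Chars.join ['-'] (bGo (PySem.Str.lower s).toList [] []))

-- ===== PRECONDITION & SPEC =====
def Spec_getTagUrl_py (s : String) (out : String) : Prop := out = getTagUrl_py_alt s
instance (s : String) (out : String) : Decidable (Spec_getTagUrl_py s out) := by unfold Spec_getTagUrl_py; infer_instance

-- ===== CLAIM (what is proved, stated in full; the proofs are below) =====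
def Claim_equal_getTagUrl_py : Prop := ∀ (s : String), Dom_getTagUrl_py s → Spec_getTagUrl_py s (getTagUrl_py s)

-- ===== LEMMAS AND PROOFS =====

-- the alphanumeric test both programs apply to each lowered character
def okc (c : Char) : Bool := PySem.Chars.isalpha c || PySem.Chars.isdigit c

-- what A's marking pass does to one character
def mark (c : Char) : Char := if okc c then c else '-'

theorem okc_ne_dash {c : Char} (h : okc c = true) : c ≠ '-' := by
  intro rfl_h; subst rfl_h; revert h; decide

-- one pass of tag.replace("--", "-")
def stepDD : List Char → List Char
  | [] => []
  | '-' :: '-' :: t => '-' :: stepDD t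
  | c :: t => c :: stepDD t

-- full collapse of adjacent dashes (the fixpoint A's while loop reaches)
def squeeze : List Char → List Char
  | [] => []
  | [a] => [a]
  | a :: b :: t => if a = '-' ∧ b = '-' then squeeze (b :: t) else a :: squeeze (b :: t)

-- maximal alphanumeric runs of the lowered string
def words : List Char → List (List Char)
  | [] => []
  | c :: t =>
      if okc c then (c :: t.takeWhile okc) :: words (t.dropWhile okc) else words t
termination_by cs => cs.length
decreasing_by
  · exact Nat.lt_succ_of_le (List.length_dropWhile_le _ _)
  · exact Nat.lt_succ_self _

-- right strip("-") as reverse/dropWhile/reverse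
def rstripD (x : List Char) : List Char :=
  (List.dropWhile (fun c => (['-'] : List Char).contains c) x.reverse).reverse

-- the part of the answer contributed by everything after the first alphanumeric run
def tailJoin (u : List Char) : List Char :=
  if words u = [] then [] else '-' :: PySem.Chars.join ['-'] (words u)

theorem stepDD_cons_of_ne (c : Char) (t : List Char) (h : c ≠ '-') :
    stepDD (c :: t) = c :: stepDD t := by
  rw [stepDD.eq_def]
  split
  · rename_i heq; cases heq
  · rename_i heq; injection heq with h1 _; exact absurd h1 h
  · rename_i heq; injection heq with h1 h2; subst h1; subst h2; rfl

theorem stepDD_dash_cons_of_ne (d : Char) (t : List Char) (h : d ≠ '-') :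
    stepDD ('-' :: d :: t) = '-' :: stepDD (d :: t) := by
  rw [stepDD.eq_def]
  split
  · rename_i heq; cases heq
  · rename_i heq; injection heq with _ h2; injection h2 with h2 _; exact absurd h2 h
  · rename_i heq; injection heq with h1 h2; subst h1; subst h2; rfl

theorem replace_go_eq : ∀ (fuel : Nat) (l acc : List Char), l.length ≤ fuel →
    PySem.Chars.replace.go ['-', '-'] ['-'] fuel l acc = acc.reverse ++ stepDD l := by
  intro fuel
  induction fuel with
  | zero =>
    intro l acc h
    have : l = [] := List.eq_nil_of_length_eq_zero (Nat.le_zero.mp h)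
    subst this
    simp [PySem.Chars.replace.go, stepDD]
  | succ n ih =>
    intro l acc h
    match l with
    | [] => simp [PySem.Chars.replace.go, stepDD]
    | c :: t =>
      by_cases hc : c = '-'
      · subst hc
        match t with
        | [] =>
          simp only [PySem.Chars.replace.go]
          rw [if_neg (by simp)]
          rw [ih [] ('-' :: acc) (by simp)]
          simp [stepDD]
        | d :: t' =>
          by_cases hd : d = '-'
          · subst hd
            simp only [PySem.Chars.replace.go]
            rw [if_pos (by simp)]
            simp only [List.length_cons] at h
            rw [show List.drop ((['-', '-'] : List Char).length) ('-' :: '-' :: t') = t' from rfl]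
            rw [ih t' (['-'].reverse ++ acc) (by omega)]
            simp [stepDD]
          · simp only [PySem.Chars.replace.go]
            rw [if_neg (by simp; intro h'; exact absurd h'.symm hd)]
            rw [ih (d :: t') ('-' :: acc) (by simp at h ⊢; omega)]
            rw [stepDD_dash_cons_of_ne d t' hd]
            simp
      · simp only [PySem.Chars.replace.go]
        rw [if_neg (by simp; intro h'; exact absurd h'.symm hc)]
        rw [ih t (c :: acc) (by simp at h; omega)]
        rw [stepDD_cons_of_ne c t hc]
        simp

theorem replace_eq_stepDD (l : List Char) :
    PySem.Chars.replace l ['-', '-'] ['-'] = stepDD l := by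
  rw [PySem.Chars.replace]
  rw [if_neg (by simp)]
  rw [replace_go_eq l.length l [] le_rfl]
  simp

theorem stepDD_len_le (l : List Char) : (stepDD l).length ≤ l.length := by
  induction l using stepDD.induct with
  | case1 => simp [stepDD]
  | case2 t ih => simp only [stepDD]; simp at ih ⊢; omega
  | case3 c t hno ih =>
    have hc : stepDD (c :: t) = c :: stepDD t := by
      rw [stepDD.eq_def]
      split
      · rename_i heq; cases heq
      · rename_i heq
        injection heq with e1 e2
        exact absurd (hno _ e1 e2) (by simp)
      · rename_i heq; injection heq with e1 e2; subst e1; subst e2; rfl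
    rw [hc]; simpa using ih

theorem stepDD_len_lt (l : List Char) (h : ['-', '-'] <:+: l) :
    (stepDD l).length < l.length := by
  induction l with
  | nil => simp at h
  | cons c t ih =>
    by_cases hc : c = '-'
    · subst hc
      match t with
      | '-' :: t' =>
        rw [show stepDD ('-' :: '-' :: t') = '-' :: stepDD t' from rfl]
        have := stepDD_len_le t'
        simp; omega
      | [] =>
        have := h.length_le
        simp at this
      | d :: t' =>
        by_cases hd : d = '-'
        · subst hd
          rw [show stepDD ('-' :: '-' :: t') = '-' :: stepDD t' from rfl]
          have := stepDD_len_le t'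
          simp; omega
        · have ht : ['-', '-'] <:+: (d :: t') := by
            obtain ⟨s1, s2, hs⟩ := h
            match s1, hs with
            | [], hs => injection hs with e1 e2; injection e2 with e2 _; exact absurd e2.symm hd
            | a :: s1', hs =>
              injection hs with _ e2
              exact ⟨s1', s2, e2⟩
          rw [stepDD_dash_cons_of_ne d t' hd]
          have := ih ht
          simp at this ⊢; omega
    · have ht : ['-', '-'] <:+: t := by
        obtain ⟨s1, s2, hs⟩ := h
        match s1, hs with
        | [], hs => injection hs with e1 _; exact absurd e1.symm hc
        | a :: s1', hs => injection hs with _ e2; exact ⟨s1', s2, e2⟩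
      rw [stepDD_cons_of_ne c t hc]
      have := ih ht
      simp at this ⊢; omega

theorem squeeze_cons_ne (a : Char) (x : List Char) (h : a ≠ '-') :
    squeeze (a :: x) = a :: squeeze x := by
  match x with
  | [] => rfl
  | b :: t => rw [squeeze, if_neg (by intro hh; exact h hh.1)]

theorem squeeze_dash_dash (t : List Char) : squeeze ('-' :: '-' :: t) = squeeze ('-' :: t) := by
  rw [squeeze, if_pos ⟨rfl, rfl⟩]

theorem squeeze_dash_cons_ne (d : Char) (t : List Char) (h : d ≠ '-') :
    squeeze ('-' :: d :: t) = '-' :: squeeze (d :: t) := by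
  rw [squeeze, if_neg (by intro hh; exact h hh.2)]

theorem squeeze_stepDD : ∀ (n : Nat) (l : List Char), l.length ≤ n →
    squeeze (stepDD l) = squeeze l ∧ ∀ a, squeeze (a :: stepDD l) = squeeze (a :: l) := by
  intro n
  induction n with
  | zero =>
    intro l h
    have : l = [] := List.eq_nil_of_length_eq_zero (Nat.le_zero.mp h)
    subst this
    exact ⟨rfl, fun a => rfl⟩
  | succ n ih =>
    intro l h
    match l with
    | [] => exact ⟨rfl, fun a => rfl⟩
    | c :: t =>
      by_cases hc : c = '-'
      · subst hc
        match t with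
        | [] => exact ⟨rfl, fun a => rfl⟩
        | d :: t' =>
          by_cases hd : d = '-'
          · subst hd
            -- l = '-' :: '-' :: t', stepDD l = '-' :: stepDD t'
            simp only [List.length_cons] at h
            have iht := ih t' (by omega)
            rw [show stepDD ('-' :: '-' :: t') = '-' :: stepDD t' from rfl]
            constructor
            · rw [squeeze_dash_dash, iht.2 '-']
            · intro a
              by_cases ha : a = '-'
              · subst ha
                rw [squeeze_dash_dash, squeeze_dash_dash, squeeze_dash_dash, iht.2 '-']
              · rw [squeeze_cons_ne a _ ha, squeeze_cons_ne a _ ha, squeeze_dash_dash, iht.2 '-']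
          · -- l = '-' :: d :: t' with d ≠ '-'
            simp only [List.length_cons] at h
            have iht := ih (d :: t') (by simp; omega)
            rw [stepDD_dash_cons_of_ne d t' hd]
            constructor
            · exact iht.2 '-' 
            · intro a
              by_cases ha : a = '-'
              · subst ha
                rw [squeeze_dash_dash, iht.2 '-', squeeze_dash_dash]
              · rw [squeeze_cons_ne a _ ha, squeeze_cons_ne a _ ha, iht.2 '-']
      · -- c ≠ '-'
        simp only [List.length_cons] at h
        have iht := ih t (by omega)
        rw [stepDD_cons_of_ne c t hc]
        constructor
        · rw [squeeze_cons_ne c _ hc, squeeze_cons_ne c _ hc, iht.1]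
        · intro a
          by_cases hac : a = '-'
          · subst hac
            rw [squeeze_dash_cons_ne c _ hc, squeeze_dash_cons_ne c _ hc,
              squeeze_cons_ne c _ hc, squeeze_cons_ne c _ hc, iht.1]
          · rw [squeeze_cons_ne a _ hac, squeeze_cons_ne a _ hac,
              squeeze_cons_ne c _ hc, squeeze_cons_ne c _ hc, iht.1]

theorem squeeze_of_no_dd : ∀ (l : List Char), ¬ (['-', '-'] <:+: l) → squeeze l = l := by
  intro l
  induction l with
  | nil => intro _; rfl
  | cons c t ih =>
    intro h
    have ht : ¬ (['-', '-'] <:+: t) := fun hh => h (hh.trans (List.suffix_cons c t).isInfix)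
    by_cases hc : c = '-'
    · subst hc
      match t with
      | [] => rfl
      | d :: t' =>
        by_cases hd : d = '-'
        · subst hd; exact absurd ⟨[], t', rfl⟩ h
        · rw [squeeze_dash_cons_ne d t' hd, ih ht]
    · rw [squeeze_cons_ne c t hc, ih ht]

theorem dashLoop_eq_squeeze : ∀ (fuel : Nat) (l : List Char), l.length ≤ fuel →
    dashLoop fuel l = squeeze l := by
  intro fuel
  induction fuel with
  | zero =>
    intro l h
    have : l = [] := List.eq_nil_of_length_eq_zero (Nat.le_zero.mp h)
    subst this; rfl
  | succ n ih =>
    intro l h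
    rw [dashLoop]
    by_cases hin : PySem.Chars.isIn ['-', '-'] l = true
    · rw [if_pos hin, replace_eq_stepDD]
      have hinf : ['-', '-'] <:+: l := (PySem.Chars.isIn_iff_infix _ _).mp hin
      have hlt := stepDD_len_lt l hinf
      rw [ih (stepDD l) (by omega)]
      exact (squeeze_stepDD l.length l le_rfl).1
    · rw [if_neg hin]
      exact (squeeze_of_no_dd l (by
        intro hinf
        exact hin ((PySem.Chars.isIn_iff_infix _ _).mpr hinf))).symm

theorem rstripD_cons_ne (a : Char) (x : List Char) (h : a ≠ '-') :
    rstripD (a :: x) = a :: rstripD x := by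
  unfold rstripD
  rw [List.reverse_cons, List.dropWhile_append]
  by_cases he : (List.dropWhile (fun c => (['-'] : List Char).contains c) x.reverse).isEmpty
  · rw [if_pos he]
    simp only [List.isEmpty_iff] at he
    rw [he]
    simp [List.dropWhile, h]
  · rw [if_neg he]
    simp

theorem rstripD_cons_dash (x : List Char) :
    rstripD ('-' :: x) = if rstripD x = [] then [] else '-' :: rstripD x := by
  unfold rstripD
  rw [List.reverse_cons, List.dropWhile_append]
  by_cases he : (List.dropWhile (fun c => (['-'] : List Char).contains c) x.reverse).isEmpty
  · rw [if_pos he]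
    simp only [List.isEmpty_iff] at he
    rw [he]
    simp [List.dropWhile]
  · rw [if_neg he]
    simp only [List.isEmpty_iff] at he
    rw [if_neg (by simpa using he)]
    simp

theorem stripChars_eq (x : List Char) :
    PySem.Chars.stripChars x ['-'] =
      rstripD (List.dropWhile (fun c => (['-'] : List Char).contains c) x) := by
  rfl

theorem dropWhile_squeeze : ∀ (n : Nat) (l : List Char), l.length ≤ n →
    List.dropWhile (fun c => (['-'] : List Char).contains c) (squeeze l) =
      squeeze (List.dropWhile (fun c => (['-'] : List Char).contains c) l) := by
  intro n
  induction n with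
  | zero =>
    intro l h
    have : l = [] := List.eq_nil_of_length_eq_zero (Nat.le_zero.mp h)
    subst this; rfl
  | succ n ih =>
    intro l h
    match l with
    | [] => rfl
    | c :: t =>
      simp only [List.length_cons] at h
      by_cases hc : c = '-'
      · subst hc
        match t with
        | [] => rfl
        | d :: t' =>
          by_cases hd : d = '-'
          · subst hd
            rw [squeeze_dash_dash]
            rw [show List.dropWhile (fun c => (['-'] : List Char).contains c) ('-' :: '-' :: t')
                = List.dropWhile (fun c => (['-'] : List Char).contains c) ('-' :: t') from by
              simp [List.dropWhile]]
            exact ih ('-' :: t') (by simp at h ⊢; omega)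
          · rw [squeeze_dash_cons_ne d t' hd]
            rw [show List.dropWhile (fun c => (['-'] : List Char).contains c) ('-' :: d :: t')
                = d :: t' from by simp [List.dropWhile, hd]]
            rw [show List.dropWhile (fun c => (['-'] : List Char).contains c) ('-' :: squeeze (d :: t'))
                = List.dropWhile (fun c => (['-'] : List Char).contains c) (squeeze (d :: t')) from by
              simp [List.dropWhile]]
            rw [ih (d :: t') (by simp at h ⊢; omega)]
            rw [show List.dropWhile (fun c => (['-'] : List Char).contains c) (d :: t')
                = d :: t' from by simp [List.dropWhile, hd]]
      · rw [squeeze_cons_ne c t hc]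
        rw [show List.dropWhile (fun c' => (['-'] : List Char).contains c') (c :: squeeze t)
            = c :: squeeze t from by simp [List.dropWhile, hc]]
        rw [show List.dropWhile (fun c' => (['-'] : List Char).contains c') (c :: t)
            = c :: t from by simp [List.dropWhile, hc]]
        rw [squeeze_cons_ne c t hc]

theorem join_cons (w : List Char) (ws : List (List Char)) :
    PySem.Chars.join ['-'] (w :: ws) =
      w ++ (if ws = [] then [] else '-' :: PySem.Chars.join ['-'] ws) := by
  match ws with
  | [] => simp [PySem.Chars.join, List.intercalate]
  | v :: ws' =>
    simp [PySem.Chars.join, List.intercalate]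

theorem map_mark_dropWhile (cs : List Char) :
    List.dropWhile (fun c => (['-'] : List Char).contains c) (cs.map mark) =
      (cs.dropWhile (fun c => !okc c)).map mark := by
  induction cs with
  | nil => rfl
  | cons c t ih =>
    by_cases hc : okc c
    · have hne := okc_ne_dash hc
      simp [List.dropWhile, mark, hc, hne]
    · simp only [List.map_cons, mark, if_neg hc]
      rw [List.dropWhile_cons_of_pos (by simp), List.dropWhile_cons_of_pos (by simp [hc]), ih]

theorem words_dropWhile_not (cs : List Char) :
    words (cs.dropWhile (fun c => !okc c)) = words cs := by
  induction cs with
  | nil => rfl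
  | cons c t ih =>
    by_cases hc : okc c
    · simp [List.dropWhile, hc]
    · rw [List.dropWhile_cons_of_pos (by simp [hc]), ih, words, if_neg hc]

theorem words_split (t : List Char) :
    words t = (if t.takeWhile okc = [] then [] else [t.takeWhile okc]) ++ words (t.dropWhile okc) := by
  match t with
  | [] => rfl
  | c :: t' =>
    by_cases hc : okc c
    · rw [words, if_pos hc, List.takeWhile_cons_of_pos hc, List.dropWhile_cons_of_pos hc]
      simp
    · rw [List.takeWhile_cons_of_neg (by simp [hc]), List.dropWhile_cons_of_neg (by simp [hc])]
      simp

theorem words_cons_pos (c : Char) (t : List Char) (hc : okc c = true) :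
    words (c :: t) = (c :: t.takeWhile okc) :: words (t.dropWhile okc) := by
  rw [words, if_pos hc]

theorem words_cons_neg (c : Char) (t : List Char) (hc : ¬ okc c = true) :
    words (c :: t) = words t := by
  rw [words, if_neg hc]

theorem rstripD_squeeze_mark : ∀ (n : Nat) (t : List Char), t.length ≤ n →
    rstripD (squeeze (t.map mark)) = t.takeWhile okc ++ tailJoin (t.dropWhile okc) := by
  intro n
  induction n with
  | zero =>
    intro t h
    have : t = [] := List.eq_nil_of_length_eq_zero (Nat.le_zero.mp h)
    subst this
    simp [rstripD, squeeze, tailJoin, words]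
  | succ n ih =>
    intro t h
    match t with
    | [] => simp [rstripD, squeeze, tailJoin, words]
    | c :: t' =>
      simp only [List.length_cons] at h
      by_cases hc : okc c
      · have hne := okc_ne_dash hc
        rw [List.map_cons, show mark c = c from by simp [mark, hc],
          squeeze_cons_ne c _ hne, rstripD_cons_ne c _ hne,
          List.takeWhile_cons_of_pos hc, List.dropWhile_cons_of_pos hc,
          ih t' (by omega)]
        simp
      · rw [List.map_cons, show mark c = '-' from by simp [mark, hc],
          List.takeWhile_cons_of_neg (by simp [hc]), List.dropWhile_cons_of_neg (by simp [hc])]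
        simp only [List.nil_append]
        -- goal: rstripD (squeeze ('-' :: map mark t')) = tailJoin (c :: t')
        have htj : tailJoin (c :: t') = tailJoin t' := by
          unfold tailJoin
          rw [words_cons_neg c t' hc]
        rw [htj]
        match t' with
        | [] => simp [rstripD, squeeze, tailJoin, words]
        | d :: t'' =>
          by_cases hd : okc d
          · have hdne := okc_ne_dash hd
            rw [List.map_cons, show mark d = d from by simp [mark, hd],
              squeeze_dash_cons_ne d _ hdne, rstripD_cons_dash,
              squeeze_cons_ne d _ hdne, rstripD_cons_ne d _ hdne]
            rw [if_neg (by simp)]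
            have ihd := ih (d :: t'') (by simp only [List.length_cons] at h ⊢; omega)
            rw [List.map_cons, show mark d = d from by simp [mark, hd],
              squeeze_cons_ne d _ hdne, rstripD_cons_ne d _ hdne] at ihd
            rw [List.takeWhile_cons_of_pos hd, List.dropWhile_cons_of_pos hd] at ihd
            rw [ihd]
            have hrhs : tailJoin (d :: t'') =
                '-' :: ((d :: List.takeWhile okc t'') ++
                  (if words (List.dropWhile okc t'') = [] then []
                   else '-' :: PySem.Chars.join ['-'] (words (List.dropWhile okc t'')))) := by
              unfold tailJoin
              rw [words_cons_pos d t'' hd, if_neg (by simp), join_cons]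
            rw [hrhs]
            simp [tailJoin]
          · -- mark d = '-' : squeeze ('-'::'-'::…) collapses; reuse ih on t'
            rw [List.map_cons, show mark d = '-' from by simp [mark, hd],
              squeeze_dash_dash]
            have iht := ih (d :: t'') (by simp only [List.length_cons] at h ⊢; omega)
            rw [List.map_cons, show mark d = '-' from by simp [mark, hd]] at iht
            rw [List.takeWhile_cons_of_neg (by simp [hd]),
              List.dropWhile_cons_of_neg (by simp [hd])] at iht
            simp only [List.nil_append] at iht
            rw [iht]

theorem dropWhile_head_false (p : Char → Bool) :
    ∀ (l rest : List Char) (c : Char), List.dropWhile p l = c :: rest → p c = false := by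
  intro l
  induction l with
  | nil => intro rest c h; simp at h
  | cons a t ih =>
    intro rest c h
    by_cases hp : p a
    · rw [List.dropWhile_cons_of_pos hp] at h
      exact ih rest c h
    · rw [List.dropWhile_cons_of_neg hp] at h
      injection h with h1 _
      subst h1
      simpa using hp

theorem strip_squeeze_eq_join (cs : List Char) :
    PySem.Chars.stripChars (squeeze (cs.map mark)) ['-'] =
      PySem.Chars.join ['-'] (words cs) := by
  rw [stripChars_eq, dropWhile_squeeze (cs.map mark).length _ le_rfl, map_mark_dropWhile]
  rw [rstripD_squeeze_mark (cs.dropWhile (fun c => !okc c)).length _ le_rfl]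
  rw [show List.takeWhile okc (cs.dropWhile (fun c => !okc c)) ++
        tailJoin (List.dropWhile okc (cs.dropWhile (fun c => !okc c))) =
      PySem.Chars.join ['-'] (words (cs.dropWhile (fun c => !okc c))) from ?_,
    words_dropWhile_not]
  · rw [words_split (cs.dropWhile (fun c => !okc c))]
    set u := cs.dropWhile (fun c => !okc c) with hu
    by_cases hte : u.takeWhile okc = []
    · have hnil : u = [] := by
        match hu2 : u with
        | [] => rfl
        | c :: rest =>
          have hpc := dropWhile_head_false (fun c => !okc c) cs rest c hu.symm
          simp only [Bool.not_eq_false'] at hpc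
          rw [List.takeWhile_cons_of_pos hpc] at hte
          cases hte
      rw [hnil]
      simp [tailJoin, words, PySem.Chars.join, List.intercalate]
    · rw [if_neg hte]
      simp only [List.singleton_append]
      rw [join_cons]
      unfold tailJoin
      by_cases hw : words (u.dropWhile okc) = []
      · simp [hw]
      · simp [hw]

theorem bGo_ws : ∀ (cs cur : List Char) (ws : List (List Char)),
    bGo cs cur ws = ws ++ bGo cs cur [] := by
  intro cs
  induction cs with
  | nil =>
    intro cur ws
    by_cases hc : cur = [] <;> simp [bGo, hc]
  | cons c t ih =>
    intro cur ws
    rw [bGo, bGo]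
    by_cases hok : PySem.Chars.isalpha c || PySem.Chars.isdigit c
    · rw [if_pos hok, if_pos hok, ih (cur ++ [c]) ws]
    · rw [if_neg hok, if_neg hok]
      by_cases hc : cur = []
      · subst hc
        rw [if_pos rfl, if_pos rfl]
        exact ih [] ws
      · rw [if_neg hc, if_neg hc]
        simp only [List.nil_append]
        rw [ih [] (ws ++ [cur]), ih [] [cur]]
        simp

theorem bGo_run : ∀ (n : Nat) (cs : List Char), cs.length ≤ n → ∀ (cur : List Char),
    bGo cs cur [] =
      (if cur ++ cs.takeWhile okc = [] then [] else [cur ++ cs.takeWhile okc]) ++ words (cs.dropWhile okc) := by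
  intro n
  induction n with
  | zero =>
    intro cs h cur
    have : cs = [] := List.eq_nil_of_length_eq_zero (Nat.le_zero.mp h)
    subst this
    by_cases hc : cur = [] <;> simp [bGo, hc, words]
  | succ n ih =>
    intro cs h cur
    match cs with
    | [] => by_cases hc : cur = [] <;> simp [bGo, hc, words]
    | c :: t =>
      simp only [List.length_cons] at h
      rw [bGo]
      by_cases hok : PySem.Chars.isalpha c || PySem.Chars.isdigit c
      · rw [if_pos hok]
        have hokc : okc c = true := by simpa [okc] using hok
        rw [ih t (by omega) (cur ++ [c])]
        rw [List.takeWhile_cons_of_pos hokc, List.dropWhile_cons_of_pos hokc]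
        simp
      · rw [if_neg hok]
        have hokc : ¬ okc c = true := by simpa [okc] using hok
        rw [bGo_ws, ih t (by omega) []]
        rw [List.takeWhile_cons_of_neg (by simpa using hokc),
          List.dropWhile_cons_of_neg (by simpa using hokc)]
        simp only [List.append_nil, List.nil_append]
        rw [← words_split t, words_cons_neg c t hokc]

theorem bGo_eq_words (cs : List Char) : bGo cs [] [] = words cs := by
  rw [bGo_run cs.length cs le_rfl [], List.nil_append, ← words_split cs]

-- ===== VERDICT (by name: the statement is the Claim_ definition above) =====
theorem getTagUrl_py_spec : Claim_equal_getTagUrl_py := by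
  intro s _
  unfold Spec_getTagUrl_py getTagUrl_py getTagUrl_py_alt
  simp only
  rw [dashLoop_eq_squeeze _ _ (by simp)]
  have hmm : (PySem.Str.lower s).toList.map
      (fun c => if PySem.Chars.isalpha c || PySem.Chars.isdigit c then c else '-')
      = (PySem.Str.lower s).toList.map mark := by
    simp [mark, okc]
  rw [hmm, strip_squeeze_eq_join, bGo_eq_words]
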